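-- pv_equiv track=rewrite | github.com/simisimon/ml-config-options | backup/other/analyze_import.py | get_relevant_lines
-- ===== SOURCE A (Python) =====
-- def get_relevant_lines(code, search_words):
--     classes = [s.replace("class:", "") for s in search_words if s.startswith("class:")]
--     search_words = [s for s in search_words if not s.startswith("class:")]
--
--     lines = []
--     for line in code:
--         for search_word in search_words:
--             if search_word in line:
--                 lines.append(line)
--
--     return lines
-- ===== SOURCE B (Python) =====
-- def get_relevant_lines(code, search_words):
--     # Transposed traversal: sweep word-by-word, tallying matches per line index,
--     # then emit each line as many times as its tally.
--     counts = [0] * len(code)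
--     for w in search_words:
--         if w.startswith("class:"):
--             continue
--         for i, line in enumerate(code):
--             if w in line:
--                 counts[i] += 1
--     out = []
--     for line, c in zip(code, counts):
--         out.extend([line] * c)
--     return out
-- ===== Notes on version B (the rewrite author's own statement) =====
-- stated objective: alternative
-- what changed: B transposes the traversal: instead of A's line-major loop with an inner word scan appending lines, B sweeps word-major, tallying per-line match counts in an index array (skipping 'class:' words inline, dropping A's dead 'classes' list), then a separate pass emits each line count times.
import Mathlib
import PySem

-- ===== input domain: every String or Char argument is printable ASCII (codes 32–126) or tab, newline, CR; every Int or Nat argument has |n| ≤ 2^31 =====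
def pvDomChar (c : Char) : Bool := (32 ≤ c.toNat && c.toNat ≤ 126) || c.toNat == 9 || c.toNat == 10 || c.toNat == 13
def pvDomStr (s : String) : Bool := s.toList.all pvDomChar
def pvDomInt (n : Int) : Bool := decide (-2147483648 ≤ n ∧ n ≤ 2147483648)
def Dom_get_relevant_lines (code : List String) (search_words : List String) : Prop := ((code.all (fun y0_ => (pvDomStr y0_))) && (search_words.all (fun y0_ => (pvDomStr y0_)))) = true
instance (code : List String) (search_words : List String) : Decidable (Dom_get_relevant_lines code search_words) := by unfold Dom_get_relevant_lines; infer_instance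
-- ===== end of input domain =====

-- B transposes the traversal: word-major sweeps tally per-line match counts into an
-- index array, then a separate pass emits each line count times (alternative; same cost).

-- ===== PORT A =====
def get_relevant_lines (code : List String) (search_words : List String) : List String :=
  let _classes := (search_words.filter (fun s => PySem.Str.startswith s "class:")).map
      (fun s => PySem.Str.replace s "class:" "")
  let search_words := search_words.filter (fun s => !PySem.Str.startswith s "class:")
  code.foldl (fun lines line =>
    search_words.foldl (fun lines search_word =>
      if PySem.Str.isIn search_word line then lines ++ [line] else lines) lines) []

-- ===== PORT B =====
def get_relevant_lines_alt (code : List String) (search_words : List String) : List String :=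
  let counts := search_words.foldl (fun counts w =>
    if PySem.Str.startswith w "class:" then counts
    else (code.zip counts).map (fun p => if PySem.Str.isIn w p.1 then p.2 + 1 else p.2))
    (List.replicate code.length 0)
  (code.zip counts).foldl (fun out p => out ++ List.replicate p.2 p.1) []

-- ===== PRECONDITION & SPEC =====
def Spec_get_relevant_lines (code : List String) (search_words : List String) (out : List String) : Prop := out = get_relevant_lines_alt code search_words
instance (code : List String) (search_words : List String) (out : List String) : Decidable (Spec_get_relevant_lines code search_words out) := by unfold Spec_get_relevant_lines; infer_instance

-- ===== CLAIM (what is proved, stated in full; the proofs are below) =====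
def Claim_equal_get_relevant_lines : Prop := ∀ (code : List String) (search_words : List String), Dom_get_relevant_lines code search_words → Spec_get_relevant_lines code search_words (get_relevant_lines code search_words)

-- ===== LEMMAS AND PROOFS =====

-- A's inner scan over the words appends 'line' once per matching word.
theorem pv_inner (line : String) (ws : List String) (acc : List String) :
    ws.foldl (fun lines w => if PySem.Str.isIn w line then lines ++ [line] else lines) acc
      = acc ++ List.replicate (ws.countP (fun w => PySem.Str.isIn w line)) line := by
  induction ws generalizing acc with
  | nil => simp
  | cons w t ih =>
    simp only [List.foldl_cons, List.countP_cons]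
    by_cases h : PySem.Str.isIn w line = true
    · rw [if_pos h, ih, if_pos h, List.append_assoc, List.singleton_append,
        ← List.replicate_succ]
    · rw [if_neg h, ih, if_neg h, Nat.add_zero]

theorem pv_zip_map {α β : Type} (l : List α) (f : α → β) :
    l.zip (l.map f) = l.map (fun x => (x, f x)) := by
  induction l with
  | nil => rfl
  | cons a t ih => simp [ih]

-- the word-major tally loop computes, per line, the number of matching non-class words
theorem pv_counts (code : List String) (ws : List String) (f : String → Nat) :
    ws.foldl (fun counts w =>
        if PySem.Str.startswith w "class:" then counts
        else (code.zip counts).map (fun p => if PySem.Str.isIn w p.1 then p.2 + 1 else p.2))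
      (code.map f)
      = code.map (fun l => f l +
          ws.countP (fun w => PySem.Str.isIn w l && !PySem.Str.startswith w "class:")) := by
  induction ws generalizing f with
  | nil => simp
  | cons w t ih =>
    simp only [List.foldl_cons, List.countP_cons]
    by_cases hc : PySem.Str.startswith w "class:" = true
    · rw [if_pos hc, ih]
      refine congrArg code.map (funext fun l => ?_)
      simp only [hc, Bool.not_true, Bool.and_false]
      simp
    · rw [if_neg hc, pv_zip_map, List.map_map]
      have := ih (fun l => if PySem.Str.isIn w l then f l + 1 else f l)
      rw [show ((fun p : String × Nat => if PySem.Str.isIn w p.1 then p.2 + 1 else p.2) ∘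
            fun x => (x, f x)) = (fun l => if PySem.Str.isIn w l then f l + 1 else f l) from rfl,
        this]
      refine congrArg code.map (funext fun l => ?_)
      simp only [hc, Bool.not_false, Bool.and_true]
      by_cases hm : PySem.Str.isIn w l = true
      · rw [if_pos hm, if_pos hm]; omega
      · rw [if_neg hm, if_neg hm]; omega

theorem pv_emit (code : List String) (f : String → Nat) (acc : List String) :
    (code.zip (code.map f)).foldl (fun out p => out ++ List.replicate p.2 p.1) acc
      = acc ++ code.flatMap (fun l => List.replicate (f l) l) := by
  induction code generalizing acc with
  | nil => simp
  | cons l t ih => simp [ih]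

theorem pv_outer (code : List String) (f : String → Nat) (acc : List String) :
    code.foldl (fun lines line => lines ++ List.replicate (f line) line) acc
      = acc ++ code.flatMap (fun line => List.replicate (f line) line) := by
  induction code generalizing acc with
  | nil => simp
  | cons l t ih => simp [ih]

-- ===== VERDICT (by name: the statement is the Claim_ definition above) =====
theorem get_relevant_lines_spec : Claim_equal_get_relevant_lines := by
  intro code search_words _
  show _ = _
  unfold get_relevant_lines get_relevant_lines_alt
  rw [show (List.replicate code.length 0 : List Nat) = code.map (fun _ => 0) by simp,
    pv_counts, pv_emit]
  simp only [pv_inner, pv_outer, List.nil_append, Nat.zero_add, List.countP_filter]
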